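-- pv_equiv track=rewrite | github.com/dvlprsh/PS | Programmers/Lv2/짝지어 제거하기.py | solution
-- ===== SOURCE A (Python) =====
-- def solution(s):
--     answer = 0
--     stack = []
--     for c in s:
--         if len(stack) == 0:
--             stack.append(c)
--         elif stack[-1] == c:
--             stack.pop()
--         else:
--             stack.append(c)
--     if len(stack) == 0:
--         return 1
--     else:
--         return 0
-- ===== SOURCE B (Python) =====
-- def _pass(t):
--     out = []
--     i = 0
--     while i < len(t):
--         if i + 1 < len(t) and t[i] == t[i + 1]:
--             i += 2
--         else:
--             out.append(t[i])
--             i += 1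
--     return "".join(out)
--
--
-- def solution(s):
--     t = s
--     while True:
--         u = _pass(t)
--         if u == t:
--             break
--         t = u
--     return 1 if t == "" else 0
-- ===== Notes on version B (the rewrite author's own statement) =====
-- stated objective: alternative
-- what changed: Replaced the left-to-right stack cancellation by a fixpoint loop that repeatedly deletes every non-overlapping adjacent equal pair in one scan until the string stops changing, then tests emptiness; correctness rests on the confluence of pair removal.
import Mathlib
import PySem

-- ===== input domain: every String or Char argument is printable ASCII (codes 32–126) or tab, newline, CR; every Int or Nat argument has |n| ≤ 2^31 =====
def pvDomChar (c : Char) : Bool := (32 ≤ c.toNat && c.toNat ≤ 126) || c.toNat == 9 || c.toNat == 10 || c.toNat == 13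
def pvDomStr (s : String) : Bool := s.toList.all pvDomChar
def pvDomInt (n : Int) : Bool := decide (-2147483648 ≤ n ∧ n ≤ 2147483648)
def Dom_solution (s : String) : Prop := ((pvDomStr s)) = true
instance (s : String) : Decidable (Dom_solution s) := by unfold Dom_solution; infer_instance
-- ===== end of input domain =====

-- B replaces A's single stack scan by a fixpoint loop of one-pass adjacent-pair deletions
-- (same results; an alternative decomposition resting on confluence of pair removal).


-- ===== PORT A =====
-- one iteration of A's for-loop; the stack is held top-first
def pvStep (stack : List Char) (c : Char) : List Char :=
  match stack with
  | [] => [c]                                    -- len(stack) == 0: append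
  | top :: rest => if top = c then rest          -- stack[-1] == c: pop
                   else c :: top :: rest         -- else: append

def solution (s : String) : Int :=
  let stack := s.toList.foldl pvStep []
  if stack = [] then 1 else 0

-- ===== PORT B =====
-- one scan of Source B's _pass: delete every non-overlapping adjacent equal pair
def pvPass (l : List Char) : List Char :=
  match l with
  | [] => []
  | [a] => [a]
  | a :: b :: t => if a = b then pvPass t else a :: pvPass (b :: t)

theorem pvPass_length_le (l : List Char) : (pvPass l).length ≤ l.length := by
  induction l using pvPass.induct with
  | case1 => simp [pvPass]
  | case2 => simp [pvPass]
  | case3 b t ih => simp only [pvPass, if_true]; simp; omega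
  | case4 a b t hab ih => simp only [pvPass, if_neg hab]; simpa using ih

theorem pvPass_len_eq (l : List Char) (heq : (pvPass l).length = l.length) :
    pvPass l = l := by
  induction l using pvPass.induct with
  | case1 => rfl
  | case2 => rfl
  | case3 b t ih =>
      exfalso
      have h1 := pvPass_length_le t
      simp only [pvPass, if_true] at heq
      simp at heq; omega
  | case4 a b t hab ih =>
      simp only [pvPass, if_neg hab] at heq ⊢
      simp only [List.length_cons, Nat.add_right_cancel_iff] at heq
      rw [ih heq]

theorem pvPass_lt (l : List Char) (h : pvPass l ≠ l) : (pvPass l).length < l.length := by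
  rcases Nat.lt_or_ge (pvPass l).length l.length with hlt | hge
  · exact hlt
  · exact absurd (pvPass_len_eq l (le_antisymm (pvPass_length_le l) hge)) h

-- Source B's while-loop: iterate _pass to a fixpoint
def pvFix (l : List Char) : List Char :=
  let u := pvPass l
  if _h : u = l then l else pvFix u
termination_by l.length
decreasing_by exact pvPass_lt l _h

def solution_alt (s : String) : Int :=
  if pvFix s.toList = [] then 1 else 0

-- ===== PRECONDITION & SPEC =====
def Spec_solution (s : String) (out : Int) : Prop := out = solution_alt s
instance (s : String) (out : Int) : Decidable (Spec_solution s out) := by unfold Spec_solution; infer_instance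

-- ===== CLAIM (what is proved, stated in full; the proofs are below) =====
def Claim_equal_solution : Prop := ∀ (s : String), Dom_solution s → Spec_solution s (solution s)

-- ===== LEMMAS AND PROOFS =====

-- the stack never holds two equal adjacent characters
theorem pvStep_chain (st : List Char) (c : Char) (h : st.IsChain (· ≠ ·)) :
    (pvStep st c).IsChain (· ≠ ·) := by
  match st with
  | [] => simp [pvStep]
  | top :: rest =>
    simp only [pvStep]
    split
    · exact h.tail
    · rename_i hne
      exact h.cons (by simpa using Ne.symm hne)

-- feeding the same character twice is a no-op on a pair-free stack
theorem pvStep_step (st : List Char) (c : Char) (h : st.IsChain (· ≠ ·)) :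
    pvStep (pvStep st c) c = st := by
  match st with
  | [] => simp [pvStep]
  | top :: rest =>
    by_cases htc : top = c
    · subst htc
      simp only [pvStep, if_true]
      cases rest with
      | nil => simp
      | cons d r =>
          have hdt : top ≠ d := (List.isChain_cons_cons.mp h).1
          simp only [pvStep]
          rw [if_neg (Ne.symm hdt)]
    · simp [pvStep, htc]

-- one pass of pair removal does not change the resulting stack
theorem pvFoldl_pass (l : List Char) (st : List Char) (h : st.IsChain (· ≠ ·)) :
    (pvPass l).foldl pvStep st = l.foldl pvStep st := by
  induction l using pvPass.induct generalizing st with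
  | case1 => rfl
  | case2 => rfl
  | case3 b t ih =>
      simp only [pvPass, if_true, List.foldl_cons]
      rw [pvStep_step st b h, ih st h]
  | case4 a b t hab ih =>
      simp only [pvPass, if_neg hab, List.foldl_cons]
      exact ih (pvStep st a) (pvStep_chain st a h)

-- a fixpoint of pvPass has no adjacent equal pair
theorem pvPass_fix_chain (l : List Char) (h : pvPass l = l) : l.IsChain (· ≠ ·) := by
  induction l using pvPass.induct with
  | case1 => simp
  | case2 => simp
  | case3 b t ih =>
      exfalso
      have h1 := pvPass_length_le t
      have := congrArg List.length h
      simp only [pvPass, if_true] at this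
      simp at this; omega
  | case4 a b t hab ih =>
      simp only [pvPass, if_neg hab, List.cons.injEq, true_and] at h
      exact List.isChain_cons_cons.mpr ⟨hab, ih h⟩

-- on a pair-free word the stack just accumulates everything, reversed
theorem pvFoldl_chain_eq (l : List Char) (st : List Char)
    (h : (l.reverse ++ st).IsChain (· ≠ ·)) : l.foldl pvStep st = l.reverse ++ st := by
  induction l generalizing st with
  | nil => simp
  | cons a t ih =>
      have hs : (a :: st).IsChain (· ≠ ·) := by
        refine List.IsChain.suffix h ⟨t.reverse, by simp⟩
      have hstep : pvStep st a = a :: st := by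
        cases st with
        | nil => rfl
        | cons d r =>
            have had : a ≠ d := (List.isChain_cons_cons.mp hs).1
            simp only [pvStep]
            rw [if_neg (Ne.symm had)]
      have h' : (t.reverse ++ (a :: st)).IsChain (· ≠ ·) := by
        simpa using h
      simp only [List.foldl_cons, hstep, ih (a :: st) h']
      simp

theorem pvFix_is_fix (l : List Char) : pvPass (pvFix l) = pvFix l := by
  induction l using pvFix.induct with
  | case1 x u hu => rw [pvFix, dif_pos hu]; exact hu
  | case2 x u hu ih => rw [pvFix, dif_neg hu]; exact ih

theorem pvFoldl_fix (l : List Char) : (pvFix l).foldl pvStep [] = l.foldl pvStep [] := by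
  induction l using pvFix.induct with
  | case1 x u hu => rw [pvFix, dif_pos hu]
  | case2 x u hu ih =>
      rw [pvFix, dif_neg hu]
      rw [ih, pvFoldl_pass x [] (by simp)]

-- master characterisation: A's stack is B's fixpoint, reversed
theorem pvStack_eq_fix (l : List Char) : l.foldl pvStep [] = (pvFix l).reverse := by
  have hchain : (pvFix l).IsChain (· ≠ ·) := pvPass_fix_chain _ (pvFix_is_fix l)
  have hrev : ((pvFix l).reverse ++ ([] : List Char)).IsChain (· ≠ ·) := by
    simp only [List.append_nil, List.isChain_reverse]
    exact hchain.imp (fun _ _ hab => Ne.symm hab)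
  calc l.foldl pvStep [] = (pvFix l).foldl pvStep [] := (pvFoldl_fix l).symm
    _ = (pvFix l).reverse ++ [] := pvFoldl_chain_eq _ _ hrev
    _ = (pvFix l).reverse := by simp

-- ===== VERDICT (by name: the statement is the Claim_ definition above) =====
theorem solution_spec : Claim_equal_solution := by
  intro s _
  unfold Spec_solution solution solution_alt
  rw [pvStack_eq_fix]
  simp
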